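-- pv_equiv track=rewrite | github.com/LynPtl/AlgorithmStudy | 模拟考试/question_3.py | transform
-- ===== SOURCE A (Python) =====
-- def transform(number):
--     '''
--     >>> transform(0)
--     0
--     >>> transform(2)
--     0
--     >>> transform(-33)
--     -33
--     >>> transform(101)
--     11
--     >>> transform(-101)
--     -11
--     >>> transform(202)
--     0
--     >>> transform(-202)
--     0
--     >>> transform(242242)
--     0
--     >>> transform(1357913)
--     9753311
--     >>> transform(-3210123)
--     -3311
--     >>> transform(22659717106393887106)
--     99777533111
--     '''
--     # return 0
--     # REPLACE THE RETURN STATEMENT ABOVE WITH YOUR CODE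
--     if number == 0:
--         return 0
--     if number > 0:
--         is_positive = True
--     else:
--         is_positive = False
--     strn = str(abs(number))
--     for i in "02468":
--         strn = strn.replace(i,"")
--     listn = []
--     for i in range(len(strn)):
--         if strn[i] != "":
--             listn.append(strn[i])
--     listn = sorted(listn,reverse=True)
--     if not listn:
--         return 0
--     if is_positive:
--         return int("".join(listn))
--     else:
--         return 0-int("".join(listn))
-- ===== SOURCE B (Python) =====
-- def transform(number):
--     if number == 0:
--         return 0
--     s = str(abs(number))
--     out = "".join(d * s.count(d) for d in "97531")
--     if not out:
--         return 0
--     magnitude = int(out)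
--     return magnitude if number > 0 else -magnitude
-- ===== Notes on version B (the rewrite author's own statement) =====
-- stated objective: alternative
-- what changed: B replaces A's filter-by-repeated-str.replace, index-loop list build and comparison sort by a counting-sort: it counts each odd digit in str(abs(number)) and rebuilds the descending digit string as '9'*cnt9 + '7'*cnt7 + ... directly, with no sort call.
import Mathlib
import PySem

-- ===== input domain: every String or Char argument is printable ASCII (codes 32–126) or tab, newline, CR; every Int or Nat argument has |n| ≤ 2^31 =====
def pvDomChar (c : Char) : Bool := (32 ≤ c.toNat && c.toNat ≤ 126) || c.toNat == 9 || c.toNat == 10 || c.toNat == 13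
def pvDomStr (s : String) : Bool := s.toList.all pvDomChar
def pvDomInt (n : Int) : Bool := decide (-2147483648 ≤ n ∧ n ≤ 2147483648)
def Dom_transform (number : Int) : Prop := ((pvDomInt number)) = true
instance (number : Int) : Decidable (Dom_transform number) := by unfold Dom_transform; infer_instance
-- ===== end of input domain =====

-- B keeps the sign/zero guards but replaces filter+comparison-sort by per-digit counting:
-- the descending digit string is rebuilt as '9'*cnt9 ++ '7'*cnt7 ++ … (a counting sort, no sort call).

-- ===== PORT A =====
-- literal port of A; strings are handled at the List Char level (PySem.Chars = Python str).
-- int("".join(listn)) is ported with ofChars?; listn is then a nonempty digit list, so it is never none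
-- and .getD 0 is unreachable.
def transform (number : Int) : Int :=
  if number = 0 then 0
  else
    let is_positive : Bool := decide (number > 0)
    let strn0 : List Char := PySem.Int.toChars (number.natAbs : Int)   -- str(abs(number))
    let strn : List Char :=
      (['0', '2', '4', '6', '8'] : List Char).foldl
        (fun s i => PySem.Chars.replace s [i] []) strn0                -- strn = strn.replace(i, "")
    let listn : List Char :=
      (PySem.List.pyRange 0 ((strn.length : Int)) 1).foldl
        (fun acc i =>
          if [PySem.List.pyGetD strn i ' '] ≠ ([] : List Char)         -- strn[i] != ""
          then acc ++ [PySem.List.pyGetD strn i ' ']                   -- listn.append(strn[i])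
          else acc) []
    let listn := PySem.List.sorted listn (fun x => x) true             -- sorted(listn, reverse=True)
    if listn = [] then 0
    else
      if is_positive then
        (PySem.Int.ofChars? (PySem.Chars.join [] (listn.map (fun c => [c])))).getD 0
      else
        0 - (PySem.Int.ofChars? (PySem.Chars.join [] (listn.map (fun c => [c])))).getD 0

-- ===== PORT B =====
-- literal port of Source B; "d * s.count(d)" (string repetition) is List.replicate, "".join is Chars.join [].
def transform_alt (number : Int) : Int :=
  if number = 0 then 0
  else
    let s : List Char := PySem.Int.toChars (number.natAbs : Int)       -- str(abs(number))
    let out : List Char :=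
      PySem.Chars.join []
        ((['9', '7', '5', '3', '1'] : List Char).map
          (fun d => List.replicate (PySem.Chars.count s [d]) d))
    if out = [] then 0
    else
      let magnitude := (PySem.Int.ofChars? out).getD 0
      if number > 0 then magnitude else -magnitude

-- ===== PRECONDITION & SPEC =====
def Spec_transform (number : Int) (out : Int) : Prop := out = transform_alt number
instance (number : Int) (out : Int) : Decidable (Spec_transform number out) := by unfold Spec_transform; infer_instance

-- ===== CLAIM (what is proved, stated in full; the proofs are below) =====
def Claim_equal_transform : Prop := ∀ (number : Int), Dom_transform number → Spec_transform number (transform number)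

-- ===== LEMMAS AND PROOFS =====

-- s.replace(c, "") for a single character c is exactly 'drop every occurrence of c'.
theorem replace_go_single (c : Char) : ∀ (l : List Char) (fuel : Nat) (acc : List Char),
    l.length ≤ fuel →
    PySem.Chars.replace.go [c] [] fuel l acc = acc.reverse ++ l.filter (fun x => !(x == c)) := by
  intro l
  induction l with
  | nil =>
    intro fuel acc _
    cases fuel <;> simp [PySem.Chars.replace.go]
  | cons x t ih =>
    intro fuel acc hf
    cases fuel with
    | zero => simp at hf
    | succ f =>
      by_cases hx : x = c
      · subst hx
        simp [PySem.Chars.replace.go, List.isPrefixOf, ih f acc (by simpa using hf)]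
      · have hb : (c == x) = false := by simp [Ne.symm hx]
        simp [PySem.Chars.replace.go, List.isPrefixOf, hb, hx,
              ih f (x :: acc) (by simpa using hf)]

theorem replace_single (l : List Char) (c : Char) :
    PySem.Chars.replace l [c] [] = l.filter (fun x => !(x == c)) := by
  simpa [PySem.Chars.replace] using replace_go_single c l l.length [] le_rfl

-- s.count(c) for a single character c is the plain element count.
theorem count_go_single (c : Char) : ∀ (l : List Char) (fuel a : Nat),
    l.length ≤ fuel →
    PySem.Chars.count.go [c] fuel l a = a + l.count c := by
  intro l
  induction l with
  | nil =>
    intro fuel a _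
    cases fuel <;> simp [PySem.Chars.count.go]
  | cons x t ih =>
    intro fuel a hf
    cases fuel with
    | zero => simp at hf
    | succ f =>
      by_cases hx : x = c
      · subst hx
        simp [PySem.Chars.count.go, List.isPrefixOf,
              ih f (a + 1) (by simpa using hf)]
        omega
      · have hb : (c == x) = false := by simp [Ne.symm hx]
        simp [PySem.Chars.count.go, List.isPrefixOf, hb,
              ih f a (by simpa using hf), hx]

theorem count_single (l : List Char) (c : Char) :
    PySem.Chars.count l [c] = l.count c := by
  simpa [PySem.Chars.count] using count_go_single c l l.length 0 le_rfl

-- A's replace loop removes exactly the characters listed in ds.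
theorem foldl_replace_eq_filter (ds : List Char) : ∀ (l : List Char),
    ds.foldl (fun s i => PySem.Chars.replace s [i] []) l
      = l.filter (fun x => !(ds.contains x)) := by
  induction ds with
  | nil => intro l; simp
  | cons d t ih =>
    intro l
    rw [List.foldl_cons, replace_single, ih, List.filter_filter]
    apply List.filter_congr
    intro x _
    by_cases hx : x = d <;> simp [hx]

theorem count_filter_ite (p : Char → Bool) (l : List Char) (x : Char) :
    (l.filter p).count x = if p x then l.count x else 0 := by
  by_cases h : p x = true
  · simp only [h, if_true]
    exact List.count_filter h
  · simp only [h, Bool.false_eq_true, if_false]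
    exact List.count_eq_zero.mpr (fun hm => h (List.of_mem_filter hm))

-- every character of str(n) for n : Nat is a decimal digit
theorem mem_toDigitsCore_ten : ∀ (f n : Nat) (acc : List Char) (c : Char),
    c ∈ Nat.toDigitsCore 10 f n acc →
    c ∈ acc ∨ c ∈ (['0','1','2','3','4','5','6','7','8','9'] : List Char) := by
  intro f
  induction f with
  | zero => intro n acc c hc; exact Or.inl hc
  | succ f ih =>
    intro n acc c hc
    have hdig : Nat.digitChar (n % 10) ∈ (['0','1','2','3','4','5','6','7','8','9'] : List Char) := by
      have h10 : n % 10 < 10 := Nat.mod_lt _ (by norm_num)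
      interval_cases h : n % 10 <;> simp [Nat.digitChar]
    simp only [Nat.toDigitsCore] at hc
    by_cases hz : n / 10 = 0
    · simp only [hz, if_pos] at hc
      rcases List.mem_cons.mp hc with h | h
      · exact Or.inr (h ▸ hdig)
      · exact Or.inl h
    · simp only [if_neg hz] at hc
      rcases ih (n / 10) (Nat.digitChar (n % 10) :: acc) c hc with h | h
      · rcases List.mem_cons.mp h with h' | h'
        · exact Or.inr (h' ▸ hdig)
        · exact Or.inl h'
      · exact Or.inr h

theorem mem_toDigits_ten (n : Nat) (c : Char)
    (hc : c ∈ Nat.toDigits 10 n) :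
    c ∈ (['0','1','2','3','4','5','6','7','8','9'] : List Char) := by
  rcases mem_toDigitsCore_ten (n + 1) n [] c hc with h | h
  · simp at h
  · exact h

theorem toChars_natAbs (n : Int) :
    PySem.Int.toChars (n.natAbs : Int) = Nat.toDigits 10 n.natAbs := by
  have h : ¬((n.natAbs : Int) < 0) := by omega
  simp only [PySem.Int.toChars, if_neg h, Int.toNat_natCast]

-- B's counting-sort output, written as explicit blocks
def bucketOut (cs : List Char) : List Char :=
  List.replicate (cs.count '9') '9' ++ (List.replicate (cs.count '7') '7' ++
  (List.replicate (cs.count '5') '5' ++ (List.replicate (cs.count '3') '3' ++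
  List.replicate (cs.count '1') '1')))

theorem rep_pairwise (n : Nat) (c : Char) :
    (List.replicate n c).Pairwise (fun a b : Char => b ≤ a) :=
  List.pairwise_replicate.mpr (by simp)

theorem pairwise_ge_rep_append (c : Char) (n : Nat) (l : List Char)
    (hl : l.Pairwise (fun a b : Char => b ≤ a)) (hc : ∀ x ∈ l, x ≤ c) :
    (List.replicate n c ++ l).Pairwise (fun a b : Char => b ≤ a) := by
  refine List.pairwise_append.mpr ⟨rep_pairwise _ _, hl, ?_⟩
  intro a ha b hb
  rw [List.eq_of_mem_replicate ha]
  exact hc b hb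

theorem bucket_pairwise (cs : List Char) :
    (bucketOut cs).Pairwise (fun a b : Char => b ≤ a) := by
  unfold bucketOut
  refine pairwise_ge_rep_append _ _ _ (pairwise_ge_rep_append _ _ _
    (pairwise_ge_rep_append _ _ _ (pairwise_ge_rep_append _ _ _
      (rep_pairwise _ _) ?_) ?_) ?_) ?_ <;>
  · intro x hx
    simp only [List.mem_append, List.mem_replicate] at hx
    first
      | (rcases hx with ⟨_, rfl⟩ | ⟨_, rfl⟩ | ⟨_, rfl⟩ | ⟨_, rfl⟩ <;> decide)
      | (rcases hx with ⟨_, rfl⟩ | ⟨_, rfl⟩ | ⟨_, rfl⟩ <;> decide)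
      | (rcases hx with ⟨_, rfl⟩ | ⟨_, rfl⟩ <;> decide)
      | (rcases hx with ⟨_, rfl⟩; decide)

theorem bucket_perm (cs : List Char)
    (hd : ∀ c ∈ cs, c ∈ (['0','1','2','3','4','5','6','7','8','9'] : List Char)) :
    (bucketOut cs).Perm
      (cs.filter (fun x => !((['0','2','4','6','8'] : List Char).contains x))) := by
  rw [List.perm_iff_count]
  intro x
  by_cases hx : x ∈ cs
  · have hx10 := hd x hx
    unfold bucketOut
    fin_cases hx10 <;>
      simp [List.count_append, List.count_replicate, count_filter_ite]
  · have h0 : cs.count x = 0 := List.count_eq_zero.mpr hx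
    have h1 : (cs.filter (fun x => !((['0','2','4','6','8'] : List Char).contains x))).count x = 0 := by
      apply List.count_eq_zero.mpr
      intro h
      exact hx (List.mem_of_mem_filter h)
    unfold bucketOut
    simp only [List.count_append, List.count_replicate, beq_iff_eq, h1]
    split_ifs <;> subst_vars <;> simp_all

-- sorted(xs, reverse=True) equals any weakly-decreasing rearrangement (identity key)
theorem rev_sorted_eq (xs ys : List Char)
    (hperm : ys.Perm xs) (hp : ys.Pairwise (fun a b : Char => b ≤ a)) :
    PySem.List.sorted xs (fun x => x) true = ys := by
  have h1 : (PySem.List.sorted xs (fun x => x) true).Perm ys :=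
    (PySem.List.sorted_perm xs (fun x => x) true).trans hperm.symm
  have h2 : (PySem.List.sorted xs (fun x => x) true).Pairwise (fun a b : Char => b ≤ a) :=
    PySem.List.sorted_pairwise_rev xs (fun x => x)
  exact h1.eq_of_pairwise (fun a b _ _ hab hba => le_antisymm hba hab) h2 hp

-- B's joined output IS bucketOut
theorem out_eq_bucket (cs : List Char) :
    PySem.Chars.join []
        ((['9', '7', '5', '3', '1'] : List Char).map
          (fun d => List.replicate (PySem.Chars.count cs [d]) d)) = bucketOut cs := by
  simp only [List.map_cons, List.map_nil, count_single]
  rw [PySem.Chars.join_cons_cons, PySem.Chars.join_cons_cons, PySem.Chars.join_cons_cons,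
      PySem.Chars.join_cons_cons, PySem.Chars.join_singleton]
  simp [bucketOut]

-- ===== VERDICT (by name: the statement is the Claim_ definition above) =====
theorem transform_spec : Claim_equal_transform := by
  intro number _
  unfold Spec_transform transform transform_alt
  by_cases h0 : number = 0
  · simp [h0]
  · simp only [if_neg h0]
    rw [toChars_natAbs]
    set cs : List Char := Nat.toDigits 10 number.natAbs with hcs
    have hd : ∀ c ∈ cs, c ∈ (['0','1','2','3','4','5','6','7','8','9'] : List Char) :=
      fun c hc => mem_toDigits_ten _ c hc
    rw [foldl_replace_eq_filter]
    set strn : List Char := cs.filter (fun x => !((['0','2','4','6','8'] : List Char).contains x)) with hstrn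
    have hlist :
        (PySem.List.pyRange 0 ((strn.length : Int)) 1).foldl
          (fun acc i =>
            if [PySem.List.pyGetD strn i ' '] ≠ ([] : List Char)
            then acc ++ [PySem.List.pyGetD strn i ' ']
            else acc) [] = strn := by
      have := PySem.List.foldl_pyRange_zero_pyGetD' strn ' '
        (fun acc x => acc ++ [x]) ([] : List Char)
      simp only [ne_eq, List.cons_ne_nil, not_false_eq_true, if_true]
      rw [this]
      simpa using PySem.List.foldl_append_singleton_eq_map (fun x => x) strn []
    rw [hlist]
    have hsort : PySem.List.sorted strn (fun x => x) true = bucketOut cs :=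
      rev_sorted_eq strn (bucketOut cs) (bucket_perm cs hd) (bucket_pairwise cs)
    rw [hsort, out_eq_bucket]
    by_cases hnil : bucketOut cs = []
    · simp [hnil]
    · simp only [if_neg hnil]
      have hjoin : PySem.Chars.join [] ((bucketOut cs).map (fun c => [c])) = bucketOut cs :=
        PySem.Chars.join_nil_singletons (bucketOut cs)
      rw [hjoin]
      by_cases hpos : number > 0
      · simp [hpos]
      · simp only [hpos, decide_false, Bool.false_eq_true, if_false]
        ring
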